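-- pv_equiv track=rewrite | github.com/novoalab/nanoRMS2 | src/encode_mods.py | get_all_mers
-- ===== SOURCE A (Python) =====
-- def get_all_mers(motif):
--     mers = ['']
--     # TODO add motifs with degenerated sequence ie CCWTT or DRACH
--     for pos in motif:
--         nmers = []
--         for b in pos:
--             for m in mers:
--                 nmers.append(m+b)
--         mers = nmers
--     return set(mers)
-- ===== SOURCE B (Python) =====
-- def get_all_mers(motif):
--     def rec(m):
--         if not m:
--             return ['']
--         prefixes = rec(m[:-1])
--         return [p + c for c in m[-1] for p in prefixes]
--     return set(rec(motif))
-- ===== Notes on version B (the rewrite author's own statement) =====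
-- stated objective: alternative
-- what changed: Replaces A's iterative loop with mutable accumulator lists by a recursive decomposition that peels the last motif position and builds the cross product from the recursive result, converting to a set once at the end.
import Mathlib
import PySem

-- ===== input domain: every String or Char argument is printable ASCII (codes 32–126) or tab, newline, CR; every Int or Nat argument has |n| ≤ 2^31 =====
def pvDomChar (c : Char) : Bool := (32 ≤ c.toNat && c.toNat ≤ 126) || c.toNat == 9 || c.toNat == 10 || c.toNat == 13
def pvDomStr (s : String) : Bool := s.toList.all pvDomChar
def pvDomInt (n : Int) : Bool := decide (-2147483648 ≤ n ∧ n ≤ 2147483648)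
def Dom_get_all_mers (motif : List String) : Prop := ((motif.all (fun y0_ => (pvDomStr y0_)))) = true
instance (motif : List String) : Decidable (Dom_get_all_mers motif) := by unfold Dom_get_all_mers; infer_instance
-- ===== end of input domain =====

-- B replaces A's iterative accumulator loop by a recursion peeling the last motif position; alternative decomposition, same cost.


-- ===== PORT A =====
def get_all_mers (motif : List String) : List String :=
  let mers := motif.foldl (fun mers pos =>
    let nmers : List String := []
    let nmers := pos.toList.foldl (fun nmers b =>
      mers.foldl (fun nmers m => nmers ++ [m.push b]) nmers) nmers
    nmers) [""]
  PySem.Set.ofList mers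

-- ===== PORT B =====
def gamRec (m : List String) : List String :=
  if h : m = [] then [""]
  else
    let prefixes := gamRec m.dropLast
    (m.getLast h).toList.flatMap (fun c => prefixes.map (fun p => p.push c))
termination_by m.length
decreasing_by
  have : m.length ≠ 0 := fun h0 => h (List.eq_nil_of_length_eq_zero h0)
  simp [List.length_dropLast]; omega

def get_all_mers_alt (motif : List String) : List String :=
  PySem.Set.ofList (gamRec motif)

-- ===== PRECONDITION & SPEC =====
def Spec_get_all_mers (motif : List String) (out : List String) : Prop := out = get_all_mers_alt motif
instance (motif : List String) (out : List String) : Decidable (Spec_get_all_mers motif out) := by unfold Spec_get_all_mers; infer_instance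

-- ===== CLAIM (what is proved, stated in full; the proofs are below) =====
def Claim_equal_get_all_mers : Prop := ∀ (motif : List String), Dom_get_all_mers motif → Spec_get_all_mers motif (get_all_mers motif)

-- ===== LEMMAS AND PROOFS =====

-- A's double inner loop over one position is the cross-product flatMap.
theorem gam_step (mers : List String) (pos : String) :
    pos.toList.foldl (fun nmers b =>
      mers.foldl (fun nmers m => nmers ++ [m.push b]) nmers) [] =
    pos.toList.flatMap (fun b => mers.map (fun m => m.push b)) := by
  have h : (fun (nmers : List String) (b : Char) =>
        mers.foldl (fun nmers m => nmers ++ [m.push b]) nmers) =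
      (fun (nmers : List String) (b : Char) => nmers ++ mers.map (fun m => m.push b)) :=
    funext fun nmers => funext fun b =>
      PySem.List.foldl_append_singleton_eq_map (fun m => m.push b) mers nmers
  rw [h]
  simpa using PySem.List.foldl_append_eq_flatMap (fun b => mers.map (fun m => m.push b)) pos.toList []

-- A's foldl and B's back recursion build the same list of k-mers.
theorem gam_foldl_eq (motif : List String) :
    motif.foldl (fun mers pos =>
      pos.toList.foldl (fun nmers b =>
        mers.foldl (fun nmers m => nmers ++ [m.push b]) nmers) []) [""] =
    gamRec motif := by
  induction motif using List.reverseRecOn with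
  | nil => simp [gamRec]
  | append_singleton xs x ih =>
    rw [List.foldl_append, List.foldl_cons, List.foldl_nil, ih, gam_step]
    conv_rhs => rw [gamRec]
    simp

-- ===== VERDICT (by name: the statement is the Claim_ definition above) =====
theorem get_all_mers_spec : Claim_equal_get_all_mers := by
  intro motif _
  unfold Spec_get_all_mers get_all_mers get_all_mers_alt
  simp only []
  rw [gam_foldl_eq]
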